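-- pv_equiv track=rewrite | github.com/Maleick/adscan | adscan_internal/cli/domains.py | order_domains_for_scan
-- ===== SOURCE A (Python) =====
-- def order_domains_for_scan(source_domain: str, domains: list[str]) -> list[str]:
--     """Order domains for scanning: source first, then closest relations."""
--     source_norm = source_domain.lower().strip()
--     normalized_to_original: dict[str, str] = {}
--     seen: set[str] = set()
--     ordered_norm: list[str] = []
--
--     for item in domains:
--         item_norm = item.lower().strip()
--         if not item_norm or item_norm in seen:
--             continue
--         seen.add(item_norm)
--         normalized_to_original.setdefault(item_norm, item.strip())
--         ordered_norm.append(item_norm)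
--
--     if source_norm:
--         normalized_to_original.setdefault(source_norm, source_domain.strip())
--         if source_norm in ordered_norm:
--             ordered_norm = [source_norm] + [d for d in ordered_norm if d != source_norm]
--         else:
--             ordered_norm.insert(0, source_norm)
--
--     parent_chain: list[str] = []
--     source_parts = source_norm.split(".") if source_norm else []
--     if len(source_parts) > 2:
--         for idx in range(1, len(source_parts)):
--             parent = ".".join(source_parts[idx:])
--             if parent and parent not in parent_chain:
--                 parent_chain.append(parent)
--
--     start_root = ".".join(source_parts[-2:]) if len(source_parts) >= 2 else ""
--
--     def _group_key(dom: str) -> tuple[int, int | str]: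
--         if dom == source_norm:
--             return (0, 0)
--         if dom in parent_chain:
--             return (1, parent_chain.index(dom))
--         if start_root and dom.endswith(start_root):
--             return (2, dom)
--         parts = dom.split(".")
--         root_rank = 0 if len(parts) == 2 else 1
--         return (3, f"{root_rank}:{dom}")
--
--     ordered_norm = sorted(ordered_norm, key=lambda d: _group_key(d))
--     return [normalized_to_original.get(dom, dom) for dom in ordered_norm]
-- ===== SOURCE B (Python) =====
-- def order_domains_for_scan(source_domain: str, domains: list[str]) -> list[str]:
--     """Order domains for scanning: partition into relation buckets, sort each bucket, concatenate."""
--     source_norm = source_domain.lower().strip()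
--     originals: dict[str, str] = {}
--     norms: list[str] = []
--     for item in domains:
--         n = item.lower().strip()
--         if n and n not in originals:
--             originals[n] = item.strip()
--             norms.append(n)
--     if source_norm and source_norm not in originals:
--         originals[source_norm] = source_domain.strip()
--         norms.append(source_norm)
--     parts = source_norm.split(".") if source_norm else []
--     chain: list[str] = []
--     if len(parts) > 2:
--         for idx in range(1, len(parts)):
--             parent = ".".join(parts[idx:])
--             if parent and parent not in chain:
--                 chain.append(parent)
--     start_root = ".".join(parts[-2:]) if len(parts) >= 2 else ""
--     src_b, par_b, suf_b, rest_b = [], [], [], []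
--     for d in norms:
--         if d == source_norm:
--             src_b.append(d)
--         elif d in chain:
--             par_b.append(d)
--         elif start_root and d.endswith(start_root):
--             suf_b.append(d)
--         else:
--             rest_b.append(d)
--     par_present = set(par_b)
--     par_b = [p for p in chain if p in par_present]
--     suf_b.sort()
--     rest_b.sort(key=lambda d: (0 if len(d.split(".")) == 2 else 1, d))
--     ordered = src_b + par_b + suf_b + rest_b
--     return [originals.get(d, d) for d in ordered]
-- ===== Notes on version B (the rewrite author's own statement) =====
-- stated objective: alternative
-- what changed: Replaces A's single sort with a composite four-way group key by an explicit one-pass partition into source / parent-chain / suffix / rest buckets, ordering the parent bucket by filtering the parent chain and sorting only the suffix and rest buckets per-bucket before concatenating.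
import Mathlib
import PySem

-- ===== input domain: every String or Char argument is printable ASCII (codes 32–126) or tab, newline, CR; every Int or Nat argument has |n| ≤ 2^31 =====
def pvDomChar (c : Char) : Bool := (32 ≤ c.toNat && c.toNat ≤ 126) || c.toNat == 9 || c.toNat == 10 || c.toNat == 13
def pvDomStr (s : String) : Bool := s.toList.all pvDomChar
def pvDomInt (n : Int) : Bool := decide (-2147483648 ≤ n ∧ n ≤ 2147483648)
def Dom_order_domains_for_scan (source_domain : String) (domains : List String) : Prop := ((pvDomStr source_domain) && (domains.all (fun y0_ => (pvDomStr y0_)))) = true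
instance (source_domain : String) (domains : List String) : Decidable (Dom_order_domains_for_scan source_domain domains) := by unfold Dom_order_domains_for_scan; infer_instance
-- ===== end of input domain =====

-- B re-implements the composite-key sort as a partition into four relation buckets with per-bucket
-- sorts (alternative decomposition, similar cost); equivalence is proved for the return value.

-- helper shared by the two ports: Python's s.split(".") (the separator "." is a nonempty literal,
-- so split? never returns none)
def pvSplitDot (s : String) : List String := (PySem.Str.split? s ".").getD []

-- helper shared by the two ports: one iteration of the (identical in A and B) parent-chain loop
def pvChainStep (parts : List String) (pc : List String) (idx : Int) : List String :=
  let parent := PySem.Str.join "." (PySem.List.slice parts (some idx) none)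
  if parent != "" && !pc.contains parent then pc ++ [parent] else pc

-- ===== PORT A =====
-- _group_key: Python's key is a pair (int, int|str) compared lexicographically, where the type of
-- the second slot is determined by the first (so Python never compares an int slot with a str
-- slot).  Here the same total order is encoded order-isomorphically into Lex (Int × String): the
-- group number and the group-1 integer slot are packed into the first component (group 1 occupies
-- 1 .. parent_chain.length, so groups 2 and 3 sit at the offsets 1 + length and 2 + length), and
-- the str slot is the second component.
def pvKeyA (source_norm : String) (parent_chain : List String) (start_root : String)
    (dom : String) : Lex (Int × String) :=
  if dom == source_norm then toLex (0, "")
  else if parent_chain.contains dom then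
    toLex (1 + (((PySem.List.index? parent_chain dom).getD 0 : Nat) : Int), "")
  else if start_root != "" && PySem.Str.endswith dom start_root then
    toLex (1 + (parent_chain.length : Int), dom)
  else
    let parts := pvSplitDot dom
    let root_rank : Int := if parts.length == 2 then 0 else 1
    toLex (2 + (parent_chain.length : Int), PySem.Int.toStr root_rank ++ ":" ++ dom)

-- the body of A's dedup loop (state: normalized_to_original, seen, ordered_norm)
def pvStepA (st : PySem.Dict String String × PySem.Set String × List String) (item : String) :
    PySem.Dict String String × PySem.Set String × List String :=
  let item_norm := PySem.Str.strip (PySem.Str.lower item)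
  if item_norm == "" || PySem.Set.contains st.2.1 item_norm then st
  else (st.1.setdefault item_norm (PySem.Str.strip item),
        PySem.Set.add st.2.1 item_norm, st.2.2 ++ [item_norm])

def order_domains_for_scan (source_domain : String) (domains : List String) : List String :=
  let source_norm := PySem.Str.strip (PySem.Str.lower source_domain)
  let st := domains.foldl pvStepA (PySem.Dict.empty, PySem.Set.empty, [])
  let nto := if source_norm != "" then st.1.setdefault source_norm (PySem.Str.strip source_domain) else st.1
  let ordered :=
    if source_norm != "" then
      if (st.2.2).contains source_norm then
        [source_norm] ++ (st.2.2).filter (fun d => d != source_norm)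
      else PySem.List.insert st.2.2 0 source_norm
    else st.2.2
  let source_parts := if source_norm != "" then pvSplitDot source_norm else []
  let parent_chain :=
    if source_parts.length > 2 then
      (PySem.List.pyRange 1 (source_parts.length : Int) 1).foldl (pvChainStep source_parts) []
    else []
  let start_root :=
    if source_parts.length ≥ 2 then PySem.Str.join "." (PySem.List.slice source_parts (some (-2)) none)
    else ""
  let sortedNorm := PySem.List.sorted ordered (pvKeyA source_norm parent_chain start_root)
  sortedNorm.map (fun dom => nto.getD dom dom)

-- ===== PORT B =====
-- the body of B's dedup loop (state: originals, norms)
def pvStepB (st : PySem.Dict String String × List String) (item : String) :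
    PySem.Dict String String × List String :=
  let n := PySem.Str.strip (PySem.Str.lower item)
  if n != "" && !st.1.contains n then (st.1.insert n (PySem.Str.strip item), st.2 ++ [n]) else st

-- B's rank for the 'rest' bucket: 0 for a two-label domain, else 1
def pvRank (d : String) : Int := if (pvSplitDot d).length == 2 then 0 else 1

-- the body of B's classification loop (state: src, parent, suffix, rest buckets)
def pvBucketStep (source_norm : String) (chain : List String) (start_root : String)
    (bk : List String × List String × List String × List String) (d : String) :
    List String × List String × List String × List String :=
  if d == source_norm then (bk.1 ++ [d], bk.2.1, bk.2.2.1, bk.2.2.2)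
  else if chain.contains d then (bk.1, bk.2.1 ++ [d], bk.2.2.1, bk.2.2.2)
  else if start_root != "" && PySem.Str.endswith d start_root then
    (bk.1, bk.2.1, bk.2.2.1 ++ [d], bk.2.2.2)
  else (bk.1, bk.2.1, bk.2.2.1, bk.2.2.2 ++ [d])

def order_domains_for_scan_alt (source_domain : String) (domains : List String) : List String :=
  let source_norm := PySem.Str.strip (PySem.Str.lower source_domain)
  let st := domains.foldl pvStepB (PySem.Dict.empty, [])
  let st2 :=
    if source_norm != "" && !st.1.contains source_norm then
      (st.1.insert source_norm (PySem.Str.strip source_domain), st.2 ++ [source_norm])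
    else st
  let parts := if source_norm != "" then pvSplitDot source_norm else []
  let chain :=
    if parts.length > 2 then
      (PySem.List.pyRange 1 (parts.length : Int) 1).foldl (pvChainStep parts) []
    else []
  let start_root :=
    if parts.length ≥ 2 then PySem.Str.join "." (PySem.List.slice parts (some (-2)) none) else ""
  let bk := st2.2.foldl (pvBucketStep source_norm chain start_root) ([], [], [], [])
  let parSet := PySem.Set.ofList bk.2.1
  let par := chain.filter (fun p => PySem.Set.contains parSet p)
  let suf := PySem.List.sorted bk.2.2.1 (fun d => d)
  let rest := PySem.List.sorted bk.2.2.2 (fun d => (toLex (pvRank d, d) : Lex (Int × String)))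
  (bk.1 ++ par ++ suf ++ rest).map (fun d => st2.1.getD d d)

-- ===== PRECONDITION & SPEC =====
def Spec_order_domains_for_scan (source_domain : String) (domains : List String) (out : List String) : Prop := out = order_domains_for_scan_alt source_domain domains
instance (source_domain : String) (domains : List String) (out : List String) : Decidable (Spec_order_domains_for_scan source_domain domains out) := by unfold Spec_order_domains_for_scan; infer_instance

-- ===== CLAIM (what is proved, stated in full; the proofs are below) =====
def Claim_equal_order_domains_for_scan : Prop := ∀ (source_domain : String) (domains : List String), Dom_order_domains_for_scan source_domain domains → Spec_order_domains_for_scan source_domain domains (order_domains_for_scan source_domain domains)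

-- ===== LEMMAS AND PROOFS =====

-- the four classification predicates, in the shapes List.filter_filter produces
def pvQ1 (src : String) (d : String) : Bool := d == src
def pvQ2 (src : String) (chain : List String) (d : String) : Bool :=
  chain.contains d && !pvQ1 src d
def pvQ3 (src : String) (chain : List String) (root : String) (d : String) : Bool :=
  (root != "" && PySem.Str.endswith d root) && (!chain.contains d && !pvQ1 src d)
def pvQ4 (src : String) (chain : List String) (root : String) (d : String) : Bool :=
  !(root != "" && PySem.Str.endswith d root) && (!chain.contains d && !pvQ1 src d)

-- B's classification loop is the four filters
lemma pvBucket_eq_filter (src : String) (chain : List String) (root : String) :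
    ∀ (l : List String) (bk : List String × List String × List String × List String),
    l.foldl (pvBucketStep src chain root) bk =
      (bk.1 ++ l.filter (pvQ1 src), bk.2.1 ++ l.filter (pvQ2 src chain),
       bk.2.2.1 ++ l.filter (pvQ3 src chain root), bk.2.2.2 ++ l.filter (pvQ4 src chain root)) := by
  intro l
  induction l with
  | nil => intro bk; simp
  | cons d t ih =>
    intro bk
    rw [List.foldl_cons, pvBucketStep]
    by_cases h1 : (d == src) = true
    · rw [if_pos h1, ih]
      simp [pvQ1, pvQ2, pvQ3, pvQ4, h1]
    · rw [if_neg h1]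
      by_cases h2 : chain.contains d = true
      · rw [if_pos h2, ih]
        have hm : d ∈ chain := by simpa using h2
        simp [List.filter_cons, pvQ1, pvQ2, pvQ3, pvQ4, h1, hm]
      · rw [if_neg h2]
        have hm : d ∉ chain := by simpa using h2
        by_cases h3 : (root != "" && PySem.Str.endswith d root) = true
        · rw [if_pos h3, ih]
          have hr := by simpa using h3
          simp [List.filter_cons, pvQ1, pvQ2, pvQ3, pvQ4, h1, hm, hr.1, hr.2]
        · rw [if_neg h3, ih]
          have hr : root = "" ∨ PySem.Chars.endswith d.toList root.toList = false := by
            by_cases hroot : root = ""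
            · exact Or.inl hroot
            · refine Or.inr ?_
              have := by simpa using h3
              simpa using this (by simpa using hroot)
          simp [List.filter_cons, pvQ1, pvQ2, pvQ3, pvQ4, h1, hm]
          rcases hr with hr | hr <;> simp [hr]

-- A's and B's dedup loops agree, and B's state stays well-formed
lemma pvLoop_eq (doms : List String) :
    ∀ (D : PySem.Dict String String) (S : PySem.Set String) (l : List String),
    (∀ x, PySem.Set.contains S x = D.contains x) → (∀ x, D.contains x = l.contains x) → l.Nodup →
    (doms.foldl pvStepA (D, S, l)).1 = (doms.foldl pvStepB (D, l)).1 ∧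
    (doms.foldl pvStepA (D, S, l)).2.2 = (doms.foldl pvStepB (D, l)).2 ∧
    (∀ x, (doms.foldl pvStepB (D, l)).1.contains x = (doms.foldl pvStepB (D, l)).2.contains x) ∧
    (doms.foldl pvStepB (D, l)).2.Nodup := by
  induction doms with
  | nil => intro D S l h1 h2 h3; exact ⟨rfl, rfl, h2, h3⟩
  | cons item t ih =>
    intro D S l h1 h2 h3
    simp only [List.foldl_cons]
    by_cases hn : PySem.Str.strip (PySem.Str.lower item) = ""
    · have ha : pvStepA (D, S, l) item = (D, S, l) := by
        simp [pvStepA, hn]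
      have hb : pvStepB (D, l) item = (D, l) := by
        simp [pvStepB, hn]
      rw [ha, hb]; exact ih D S l h1 h2 h3
    · by_cases hc : l.contains (PySem.Str.strip (PySem.Str.lower item)) = true
      · have hm : PySem.Str.strip (PySem.Str.lower item) ∈ l := by simpa using hc
        have ha : pvStepA (D, S, l) item = (D, S, l) := by
          simp only [pvStepA]
          rw [if_pos (by rw [h1, h2]; simp [hm])]
        have hb : pvStepB (D, l) item = (D, l) := by
          simp only [pvStepB]
          rw [if_neg (by rw [h2]; simp [hm])]
        rw [ha, hb]; exact ih D S l h1 h2 h3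
      · have hD : D.contains (PySem.Str.strip (PySem.Str.lower item)) = false := by
          rw [h2]; simpa using hc
        have hS : PySem.Set.contains S (PySem.Str.strip (PySem.Str.lower item)) = false := by
          rw [h1]; exact hD
        have hmS : PySem.Str.strip (PySem.Str.lower item) ∉ S := by simpa using hS
        have hml : PySem.Str.strip (PySem.Str.lower item) ∉ l := by simpa using hc
        have ha : pvStepA (D, S, l) item = (D.insert (PySem.Str.strip (PySem.Str.lower item)) (PySem.Str.strip item),
            PySem.Set.add S (PySem.Str.strip (PySem.Str.lower item)), l ++ [PySem.Str.strip (PySem.Str.lower item)]) := by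
          simp only [pvStepA]
          rw [if_neg (by simp [hn, hmS])]
          rw [PySem.Dict.setdefault_of_not_contains D _ hD]
        have hb : pvStepB (D, l) item = (D.insert (PySem.Str.strip (PySem.Str.lower item)) (PySem.Str.strip item),
            l ++ [PySem.Str.strip (PySem.Str.lower item)]) := by
          simp only [pvStepB]
          rw [if_pos (by
            simp only [bne_iff_ne, ne_eq, Bool.and_eq_true, Bool.not_eq_true']
            exact ⟨hn, hD⟩)]
        rw [ha, hb]
        apply ih
        · intro x
          rw [PySem.Dict.contains_insert]
          have hx := h1 x
          simp only [PySem.Set.contains, PySem.Set.add, List.contains_eq_mem] at hx ⊢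
          rw [if_neg (by simpa using hmS)]
          simp [hx, Bool.or_comm, Bool.beq_eq_decide_eq]
        · intro x
          rw [PySem.Dict.contains_insert]
          simp [h2 x, Bool.or_comm, Bool.beq_eq_decide_eq]
        · simp only [List.nodup_append, List.nodup_singleton]
          refine ⟨h3, trivial, ?_⟩
          intro x hx y hy heq
          rw [List.mem_singleton] at hy
          rw [heq, hy] at hx
          exact hml hx

-- the parent-chain loop keeps its accumulator duplicate-free
lemma pvChain_nodup (parts : List String) :
    ∀ (idxs : List Int) (pc : List String), pc.Nodup →
    (idxs.foldl (pvChainStep parts) pc).Nodup := by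
  intro idxs
  induction idxs with
  | nil => intro pc h; simpa using h
  | cons i t ih =>
    intro pc h
    simp only [List.foldl_cons]
    apply ih
    simp only [pvChainStep]
    split
    · rename_i hc
      simp only [bne_iff_ne, Bool.and_eq_true, Bool.not_eq_true', List.contains_eq_mem,
        decide_eq_false_iff_not] at hc
      refine List.Nodup.append h (List.nodup_singleton _) ?_
      intro x hx hx2
      simp only [List.mem_singleton] at hx2
      subst hx2
      exact hc.2 hx
    · exact h

-- a duplicate-free list is strictly increasing under its own first-occurrence indices
lemma pvPairwise_idxOf (l : List String) (h : l.Nodup) :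
    l.Pairwise (fun a b => (List.idxOf? a l).getD 0 < (List.idxOf? b l).getD 0) := by
  rw [List.pairwise_iff_getElem]
  intro i j hi hj hij
  have e1 : List.idxOf? l[i] l = some i := by
    rw [List.idxOf?_eq_some_iff]
    exact ⟨hi, rfl, fun k hk => by
      intro he
      have := (List.Nodup.getElem_inj_iff h).mp he
      omega⟩
  have e2 : List.idxOf? l[j] l = some j := by
    rw [List.idxOf?_eq_some_iff]
    exact ⟨hj, rfl, fun k hk => by
      intro he
      have := (List.Nodup.getElem_inj_iff h).mp he
      omega⟩
  simp [e1, e2, hij]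

lemma pvCharKey_lt (c c' : Char) (d d' : String)
    (hcc : c < c' ∨ (c = c' ∧ d < d')) (p q : String)
    (hp : p.toList = [c]) (hq : q.toList = [c']) :
    (p ++ ":" ++ d) < (q ++ ":" ++ d') := by
  rw [String.lt_iff_toList_lt]
  simp only [String.toList_append, hp, hq]
  have h2 : (":" : String).toList = [':'] := by decide
  rw [h2]
  simp only [List.cons_append, List.nil_append]
  rw [List.cons_lt_cons_iff]
  rcases hcc with hlt | ⟨rfl, hxy⟩
  · exact Or.inl hlt
  · refine Or.inr ⟨rfl, ?_⟩
    rw [List.cons_lt_cons_iff]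
    exact Or.inr ⟨rfl, String.lt_iff_toList_lt.mp hxy⟩

-- group-3 keys: the string key "rank:dom" orders exactly as the pair (rank, dom) for rank ∈ {0,1}
lemma pvStrKey_lt (r r' : Int) (d d' : String) (hr : r = 0 ∨ r = 1) (hr' : r' = 0 ∨ r' = 1)
    (h : (toLex (r, d) : Lex (Int × String)) < toLex (r', d')) :
    (PySem.Int.toStr r ++ ":" ++ d) < (PySem.Int.toStr r' ++ ":" ++ d') := by
  rw [Prod.Lex.lt_iff] at h
  simp only [ofLex_toLex] at h
  rcases hr with rfl | rfl <;> rcases hr' with rfl | rfl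
  · have hd : d < d' := by rcases h with h | ⟨_, h⟩; omega; exact h
    exact pvCharKey_lt '0' '0' d d' (Or.inr ⟨rfl, hd⟩) _ _ (by decide) (by decide)
  · exact pvCharKey_lt '0' '1' d d' (Or.inl (by decide)) _ _ (by decide) (by decide)
  · rcases h with h | ⟨h, _⟩; omega; omega
  · have hd : d < d' := by rcases h with h | ⟨_, h⟩; omega; exact h
    exact pvCharKey_lt '1' '1' d d' (Or.inr ⟨rfl, hd⟩) _ _ (by decide) (by decide)

-- key values per classification predicate
lemma pvKey_q1 (src : String) (chain : List String) (root : String) (d : String)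
    (h : pvQ1 src d = true) : pvKeyA src chain root d = toLex (0, "") := by
  simp only [pvQ1] at h
  simp [pvKeyA, h]

lemma pvKey_q2 (src : String) (chain : List String) (root : String) (d : String)
    (h : pvQ2 src chain d = true) :
    pvKeyA src chain root d =
      toLex (1 + (((List.idxOf? d chain).getD 0 : Nat) : Int), "") := by
  simp only [pvQ2, pvQ1, Bool.and_eq_true, Bool.not_eq_true'] at h
  have hm : d ∈ chain := by simpa using h.1
  simp [pvKeyA, h.2, hm, PySem.List.index?_eq_idxOf?]

lemma pvKey_q3 (src : String) (chain : List String) (root : String) (d : String)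
    (h : pvQ3 src chain root d = true) :
    pvKeyA src chain root d = toLex (1 + (chain.length : Int), d) := by
  simp only [pvQ3, pvQ1, Bool.and_eq_true, Bool.not_eq_true'] at h
  have hm : d ∉ chain := by simpa using h.2.1
  have hroot : ¬ root = "" := by simpa using h.1.1
  have he : PySem.Chars.endswith d.toList root.toList = true := by simpa using h.1.2
  simp [pvKeyA, h.2.2, hm, hroot, he]

lemma pvKey_q4 (src : String) (chain : List String) (root : String) (d : String)
    (h : pvQ4 src chain root d = true) :
    pvKeyA src chain root d =
      toLex (2 + (chain.length : Int), PySem.Int.toStr (pvRank d) ++ ":" ++ d) := by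
  have h4 : ¬ (root != "" && PySem.Str.endswith d root) = true := by
    simp only [pvQ4, Bool.and_eq_true, Bool.not_eq_true'] at h
    rw [h.1]
    simp
  simp only [pvQ4, pvQ1, Bool.and_eq_true, Bool.not_eq_true'] at h
  have hm : d ∉ chain := by simpa using h.2.1
  have hr : root = "" ∨ PySem.Chars.endswith d.toList root.toList = false := by
    by_cases hroot : root = ""
    · exact Or.inl hroot
    · refine Or.inr ?_
      have := by simpa using h4
      simpa using this (by simpa using hroot)
  rcases hr with hr | hr <;> simp [pvKeyA, pvRank, h.2.2, hm, hr]

lemma pvKey_lt_of_group_lt (src : String) (chain : List String) (root : String) (a b : String)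
    (h : (ofLex (pvKeyA src chain root a)).1 < (ofLex (pvKeyA src chain root b)).1) :
    pvKeyA src chain root a < pvKeyA src chain root b := by
  rw [Prod.Lex.lt_iff]
  exact Or.inl h

-- a first occurrence index is below the list length
lemma pvIdx_lt (chain : List String) (a : String) (h : a ∈ chain) :
    ((List.idxOf? a chain).getD 0) < chain.length := by
  cases heq : List.idxOf? a chain with
  | none => exact absurd (List.idxOf?_eq_none_iff.mp heq) (by simpa using h)
  | some i =>
    obtain ⟨hlt, -, -⟩ := List.idxOf?_eq_some_iff.mp heq
    simpa [heq] using hlt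

-- Python's list.insert(0, x) prepends
lemma pvInsert_zero (l : List String) (x : String) : PySem.List.insert l 0 x = x :: l := by
  simp [PySem.List.insert, PySem.List.sliceIndices]

-- the central pipeline lemma: sorting by A's composite key equals B's bucket concatenation
lemma pvPipe (src root : String) (chain : List String) (nto : PySem.Dict String String)
    (ordered normsB : List String) (hperm : ordered.Perm normsB)
    (hordered : ordered.Nodup) (hchain : chain.Nodup) :
    (PySem.List.sorted ordered (pvKeyA src chain root)).map (fun d => nto.getD d d) =
    (((normsB.foldl (pvBucketStep src chain root) ([], [], [], [])).1 ++
      chain.filter (fun p => PySem.Set.contains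
        (PySem.Set.ofList (normsB.foldl (pvBucketStep src chain root) ([], [], [], [])).2.1) p) ++
      PySem.List.sorted (normsB.foldl (pvBucketStep src chain root) ([], [], [], [])).2.2.1 (fun d => d) ++
      PySem.List.sorted (normsB.foldl (pvBucketStep src chain root) ([], [], [], [])).2.2.2
        (fun d => (toLex (pvRank d, d) : Lex (Int × String)))).map (fun d => nto.getD d d)) := by
  have hnnd : normsB.Nodup := hperm.nodup hordered
  rw [pvBucket_eq_filter]
  simp only [List.nil_append]
  apply congrArg
  -- short names
  have hf1nd : (normsB.filter (pvQ1 src)).Nodup := hnnd.filter _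
  have hf2nd : (normsB.filter (pvQ2 src chain)).Nodup := hnnd.filter _
  have hf3nd : (normsB.filter (pvQ3 src chain root)).Nodup := hnnd.filter _
  have hf4nd : (normsB.filter (pvQ4 src chain root)).Nodup := hnnd.filter _
  have hparmem : ∀ p, (p ∈ chain.filter (fun p => PySem.Set.contains
      (PySem.Set.ofList (normsB.filter (pvQ2 src chain))) p)) ↔ p ∈ normsB.filter (pvQ2 src chain) := by
    intro p
    rw [List.mem_filter]
    constructor
    · intro ⟨_, hp⟩
      have : p ∈ PySem.Set.ofList (normsB.filter (pvQ2 src chain)) := by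
        simpa [PySem.Set.contains] using hp
      exact (PySem.Set.mem_ofList _ _).mp this
    · intro hp
      refine ⟨?_, ?_⟩
      · have := List.of_mem_filter hp
        simp only [pvQ2, Bool.and_eq_true] at this
        simpa using this.1
      · simp only [PySem.Set.contains, List.contains_eq_mem, decide_eq_true_eq]
        exact (PySem.Set.mem_ofList _ _).mpr hp
  have hparnd : (chain.filter (fun p => PySem.Set.contains
      (PySem.Set.ofList (normsB.filter (pvQ2 src chain))) p)).Nodup := hchain.filter _
  have hpar : (chain.filter (fun p => PySem.Set.contains
      (PySem.Set.ofList (normsB.filter (pvQ2 src chain))) p)).Perm (normsB.filter (pvQ2 src chain)) :=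
    List.perm_of_nodup_nodup_toFinset_eq hparnd hf2nd
      (by ext x; simp only [List.mem_toFinset]; exact hparmem x)
  have hsufp : (PySem.List.sorted (normsB.filter (pvQ3 src chain root)) (fun d => d)).Perm
      (normsB.filter (pvQ3 src chain root)) := PySem.List.sorted_perm _ _ _
  have hrestp : (PySem.List.sorted (normsB.filter (pvQ4 src chain root))
      (fun d => (toLex (pvRank d, d) : Lex (Int × String)))).Perm
      (normsB.filter (pvQ4 src chain root)) := PySem.List.sorted_perm _ _ _
  -- the composed filters are the bucket predicates
  have e2 : List.filter (fun d => chain.contains d) (List.filter (fun d => !pvQ1 src d) normsB) =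
      List.filter (pvQ2 src chain) normsB := by
    rw [List.filter_filter]
    exact List.filter_congr (fun x _ => by simp [pvQ2])
  have e3 : List.filter (fun d => root != "" && PySem.Str.endswith d root)
      (List.filter (fun d => !chain.contains d) (List.filter (fun d => !pvQ1 src d) normsB)) =
      List.filter (pvQ3 src chain root) normsB := by
    rw [List.filter_filter, List.filter_filter]
    exact List.filter_congr (fun x _ => by simp [pvQ3, Bool.and_assoc])
  have e4 : List.filter (fun d => !(root != "" && PySem.Str.endswith d root))
      (List.filter (fun d => !chain.contains d) (List.filter (fun d => !pvQ1 src d) normsB)) =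
      List.filter (pvQ4 src chain root) normsB := by
    rw [List.filter_filter, List.filter_filter]
    exact List.filter_congr (fun x _ => by simp [pvQ4, Bool.and_assoc])
  have p34 : (List.filter (pvQ3 src chain root) normsB ++ List.filter (pvQ4 src chain root) normsB).Perm
      (List.filter (fun d => !chain.contains d) (List.filter (fun d => !pvQ1 src d) normsB)) := by
    rw [← e3, ← e4]
    exact List.filter_append_perm _ _
  have p234 : (List.filter (pvQ2 src chain) normsB ++
      (List.filter (pvQ3 src chain root) normsB ++ List.filter (pvQ4 src chain root) normsB)).Perm
      (List.filter (fun d => !pvQ1 src d) normsB) := by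
    refine List.Perm.trans (List.Perm.append_left _ p34) ?_
    rw [← e2]
    exact List.filter_append_perm _ _
  have pall : (List.filter (pvQ1 src) normsB ++
      (List.filter (pvQ2 src chain) normsB ++
        (List.filter (pvQ3 src chain root) normsB ++ List.filter (pvQ4 src chain root) normsB))).Perm
      normsB := List.Perm.trans (List.Perm.append_left _ p234) (List.filter_append_perm _ _)
  have hys : (List.filter (pvQ1 src) normsB ++
      (chain.filter (fun p => PySem.Set.contains
        (PySem.Set.ofList (normsB.filter (pvQ2 src chain))) p) ++
       (PySem.List.sorted (normsB.filter (pvQ3 src chain root)) (fun d => d) ++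
        PySem.List.sorted (normsB.filter (pvQ4 src chain root))
          (fun d => (toLex (pvRank d, d) : Lex (Int × String)))))).Perm ordered := by
    refine List.Perm.trans (List.Perm.append_left _
      (List.Perm.append hpar (List.Perm.append hsufp hrestp))) ?_
    exact pall.trans hperm.symm
  -- membership of each bucket gives its classification predicate
  have m1 : ∀ a ∈ List.filter (pvQ1 src) normsB, pvQ1 src a = true :=
    fun a ha => List.of_mem_filter ha
  have m2 : ∀ a ∈ chain.filter (fun p => PySem.Set.contains
      (PySem.Set.ofList (normsB.filter (pvQ2 src chain))) p), pvQ2 src chain a = true :=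
    fun a ha => List.of_mem_filter ((hparmem a).mp ha)
  have m3 : ∀ a ∈ PySem.List.sorted (normsB.filter (pvQ3 src chain root)) (fun d => d),
      pvQ3 src chain root a = true :=
    fun a ha => List.of_mem_filter ((PySem.List.mem_sorted _ _ _ _).mp ha)
  have m4 : ∀ a ∈ PySem.List.sorted (normsB.filter (pvQ4 src chain root))
      (fun d => (toLex (pvRank d, d) : Lex (Int × String))), pvQ4 src chain root a = true :=
    fun a ha => List.of_mem_filter ((PySem.List.mem_sorted _ _ _ _).mp ha)
  have hys' := (List.Perm.trans (by simp [List.append_assoc]) hys :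
    ((List.filter (pvQ1 src) normsB ++
      chain.filter (fun p => PySem.Set.contains
        (PySem.Set.ofList (normsB.filter (pvQ2 src chain))) p) ++
      PySem.List.sorted (normsB.filter (pvQ3 src chain root)) (fun d => d)) ++
      PySem.List.sorted (normsB.filter (pvQ4 src chain root))
        (fun d => (toLex (pvRank d, d) : Lex (Int × String)))).Perm ordered)
  refine PySem.List.sorted_eq_of_perm_of_pairwise_lt _ _ _ hys' ?_
  simp only [List.pairwise_append, List.mem_append]
  refine ⟨⟨⟨?_, ?_, ?_⟩, ?_, ?_⟩, ?_, ?_⟩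
  · -- within the source bucket: at most one distinct element
    refine List.Pairwise.imp_of_mem (fun {a b} ha hb hne => ?_) hf1nd
    have ea : a = src := by simpa [pvQ1] using m1 a ha
    have eb : b = src := by simpa [pvQ1] using m1 b hb
    exact absurd (ea.trans eb.symm) hne
  · -- within the parent bucket: parent-chain index order
    refine List.Pairwise.imp_of_mem (fun {a b} ha hb hidx => ?_)
      (List.Pairwise.sublist List.filter_sublist (pvPairwise_idxOf chain hchain))
    rw [pvKey_q2 _ _ _ _ (m2 a ha), pvKey_q2 _ _ _ _ (m2 b hb)]
    rw [Prod.Lex.lt_iff]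
    refine Or.inl ?_
    simp only [ofLex_toLex]
    omega
  · -- source bucket before parent bucket
    intro a ha b hb
    apply pvKey_lt_of_group_lt
    rw [pvKey_q1 _ _ _ _ (m1 a ha), pvKey_q2 _ _ _ _ (m2 b hb)]
    simp only [ofLex_toLex]
    omega
  · -- within the suffix bucket: sorted by the domain string
    have hsufnd := hsufp.symm.nodup hf3nd
    refine List.Pairwise.imp_of_mem (fun {a b} ha hb hab => ?_)
      ((PySem.List.sorted_pairwise _ _).and hsufnd)
    rw [pvKey_q3 _ _ _ _ (m3 a ha), pvKey_q3 _ _ _ _ (m3 b hb)]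
    rw [Prod.Lex.lt_iff]
    exact Or.inr ⟨rfl, by simpa using lt_of_le_of_ne hab.1 hab.2⟩
  · -- source and parent buckets before the suffix bucket
    intro a ha b hb
    apply pvKey_lt_of_group_lt
    rw [pvKey_q3 _ _ _ _ (m3 b hb)]
    rcases ha with ha | ha
    · rw [pvKey_q1 _ _ _ _ (m1 a ha)]
      simp only [ofLex_toLex]
      omega
    · have hidx := pvIdx_lt chain a (by
        have := m2 a ha
        simp only [pvQ2, Bool.and_eq_true] at this
        simpa using this.1)
      rw [pvKey_q2 _ _ _ _ (m2 a ha)]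
      simp only [ofLex_toLex]
      omega
  · -- within the rest bucket: sorted by (root_rank, domain)
    have hrestnd := hrestp.symm.nodup hf4nd
    refine List.Pairwise.imp_of_mem (fun {a b} ha hb hab => ?_)
      ((PySem.List.sorted_pairwise _ _).and hrestnd)
    rw [pvKey_q4 _ _ _ _ (m4 a ha), pvKey_q4 _ _ _ _ (m4 b hb)]
    have hkne : (toLex (pvRank a, a) : Lex (Int × String)) ≠ toLex (pvRank b, b) := by
      intro h
      exact hab.2 (congrArg (fun x => (ofLex x).2) h)
    have hklt := lt_of_le_of_ne hab.1 hkne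
    refine (Prod.Lex.lt_iff).mpr (Or.inr ⟨rfl, ?_⟩)
    simp only [ofLex_toLex]
    exact pvStrKey_lt _ _ _ _ (by unfold pvRank; split <;> simp) (by unfold pvRank; split <;> simp) hklt
  · -- everything else before the rest bucket
    intro a ha b hb
    apply pvKey_lt_of_group_lt
    rw [pvKey_q4 _ _ _ _ (m4 b hb)]
    rcases ha with (ha | ha) | ha
    · rw [pvKey_q1 _ _ _ _ (m1 a ha)]
      simp only [ofLex_toLex]
      omega
    · have hidx := pvIdx_lt chain a (by
        have := m2 a ha
        simp only [pvQ2, Bool.and_eq_true] at this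
        simpa using this.1)
      rw [pvKey_q2 _ _ _ _ (m2 a ha)]
      simp only [ofLex_toLex]
      omega
    · rw [pvKey_q3 _ _ _ _ (m3 a ha)]
      simp only [ofLex_toLex]
      omega

-- ===== VERDICT (by name: the statement is the Claim_ definition above) =====
theorem order_domains_for_scan_spec : Claim_equal_order_domains_for_scan := by
  intro sd doms _
  unfold Spec_order_domains_for_scan
  obtain ⟨hdict, hlist, hinv, hnd⟩ := pvLoop_eq doms PySem.Dict.empty PySem.Set.empty []
    (fun x => by simp [PySem.Set.contains, PySem.Dict.contains_empty])
    (fun x => by simp [PySem.Dict.contains_empty])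
    List.nodup_nil
  unfold order_domains_for_scan order_domains_for_scan_alt
  simp only [hdict, hlist]
  set src := PySem.Str.strip (PySem.Str.lower sd) with hsrcdef
  set D := (doms.foldl pvStepB (PySem.Dict.empty, [])).1 with hDdef
  set l := (doms.foldl pvStepB (PySem.Dict.empty, [])).2 with hldef
  have hchain_nodup : ∀ (parts : List String),
      (if parts.length > 2 then
        (PySem.List.pyRange 1 (parts.length : Int) 1).foldl (pvChainStep parts) []
       else []).Nodup := by
    intro parts
    split
    · exact pvChain_nodup parts _ [] List.nodup_nil
    · exact List.nodup_nil
  by_cases hs : (src != "") = true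
  · by_cases hc : l.contains src = true
    · have hDc : D.contains src = true := by rw [hinv src]; exact hc
      simp only [hs, Bool.true_and, hDc, Bool.not_true, if_true,
        Bool.false_eq_true, if_false, hc]
      rw [PySem.Dict.setdefault_of_contains D _ hDc]
      have hmem : src ∈ l := by simpa using hc
      have hfnd : (l.filter (fun d => d != src)).Nodup := hnd.filter _
      have hnotin : src ∉ l.filter (fun d => d != src) := by
        intro h
        have := List.of_mem_filter h
        simp at this
      have hpm : (src :: l.filter (fun d => d != src)).Perm l := by
        refine List.perm_of_nodup_nodup_toFinset_eq (by
          rw [List.nodup_cons]; exact ⟨hnotin, hfnd⟩) hnd ?_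
        ext x
        by_cases hx : x = src
        · subst hx
          simp [hmem]
        · simp [List.mem_toFinset, hx]
      exact pvPipe src _ _ D (src :: l.filter (fun d => d != src)) l hpm
        (by rw [List.nodup_cons]; exact ⟨hnotin, hfnd⟩) (hchain_nodup _)
    · have hDc : D.contains src = false := by rw [hinv src]; simpa using hc
      have hcf : l.contains src = false := by simpa using hc
      simp only [hs, Bool.true_and, hDc, Bool.not_false, if_true,
        hcf, Bool.false_eq_true, if_false]
      rw [PySem.Dict.setdefault_of_not_contains D _ hDc, pvInsert_zero]
      have hml : src ∉ l := by simpa using hc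
      exact pvPipe src _ _ (D.insert src (PySem.Str.strip sd)) (src :: l) (l ++ [src])
        (List.perm_append_singleton src l).symm
        (by rw [List.nodup_cons]; exact ⟨hml, hnd⟩) (hchain_nodup _)
  · have hsf : (src != "") = false := by simpa using hs
    simp only [hsf, Bool.false_and, Bool.false_eq_true, if_false]
    exact pvPipe src _ _ D l l (List.Perm.refl l) hnd (hchain_nodup _)
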